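-- pv_equiv track=rewrite | github.com/keon/algorithms | algorithms/calculator/math_parser.py | parse
-- ===== SOURCE A (Python) =====
-- __operators__ = "+-/*^"
--
-- __parenthesis__ = "()"
--
-- def parse(expression):
--     """
--     Return array of parsed tokens in the expression
--
--     expression String: Math expression to parse in infix notation
--     """
--     result = []
--     current = ""
--     for i in expression:
--         if i.isdigit() or i == '.':
--             current += i
--         else:
--             if len(current) > 0:
--                 result.append(current)
--                 current = ""
--             if i in __operators__ or i in __parenthesis__:
--                 result.append(i)
--             else:
--                 raise Exception("invalid syntax " + i)
--
--     if len(current) > 0: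
--         result.append(current)
--     return result
-- ===== SOURCE B (Python) =====
-- def parse(expression):
--     """
--     Return array of parsed tokens in the expression
--
--     expression String: Math expression to parse in infix notation
--     """
--     result = []
--     i = 0
--     n = len(expression)
--     while i < n:
--         c = expression[i]
--         if c.isdigit() or c == '.':
--             j = i + 1
--             while j < n and (expression[j].isdigit() or expression[j] == '.'):
--                 j += 1
--             result.append(expression[i:j])
--             i = j
--         elif c in "+-/*^()":
--             result.append(c)
--             i += 1
--         else:
--             raise Exception("invalid syntax " + c)
--     return result
-- ===== Notes on version B (the rewrite author's own statement) =====
-- stated objective: alternative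
-- what changed: Replaces A's char-by-char accumulator loop (building up a pending 'current' token and flushing it at operators and at the end) with an index-based scanner that, at each position, slices out the whole maximal digit/dot run at once and advances past it, so no pending-token state or final flush exists.
import Mathlib
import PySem

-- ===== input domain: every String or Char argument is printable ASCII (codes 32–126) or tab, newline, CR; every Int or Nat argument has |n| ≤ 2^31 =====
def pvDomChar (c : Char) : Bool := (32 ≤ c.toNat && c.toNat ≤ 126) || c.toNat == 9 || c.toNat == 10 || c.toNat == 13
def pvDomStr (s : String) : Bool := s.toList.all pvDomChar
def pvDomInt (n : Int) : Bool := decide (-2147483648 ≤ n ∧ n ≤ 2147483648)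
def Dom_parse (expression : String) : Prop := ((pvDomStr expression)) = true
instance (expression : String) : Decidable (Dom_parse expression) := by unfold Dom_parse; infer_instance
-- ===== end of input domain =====

-- B replaces A's pending-token accumulator loop with an index scanner that slices out each
-- maximal digit/dot run at once; same tokens, same cost (objective: alternative).

-- ===== PORT A =====
-- i.isdigit() or i == '.'  (exact on the ASCII domain: Python isdigit = '0'..'9' there)
def pvIsNum (c : Char) : Bool := c.isDigit || c = '.'
-- i in __operators__ or i in __parenthesis__
def pvIsOp (c : Char) : Bool := ("+-/*^" : String).toList.contains c || ("()" : String).toList.contains c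

-- A's for-loop over the characters, state (result, current); 'raise' becomes none
def parseGoA (result : List String) (current : List Char) : List Char → Option (List String)
  | [] => some (if current.length > 0 then result ++ [String.mk current] else result)
  | c :: rest =>
    if pvIsNum c then parseGoA result (current ++ [c]) rest
    else
      let result' := if current.length > 0 then result ++ [String.mk current] else result
      if pvIsOp c then parseGoA (result' ++ [String.mk [c]]) [] rest
      else none   -- Python raises Exception here (excluded by Pre_parse)

def parse (expression : String) : List String :=
  (parseGoA [] [] expression.toList).getD []

-- ===== PORT B =====
-- B's while-loop: at each position slice off a maximal digit/dot run, or a single operator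
def parseGoB : List Char → List String
  | [] => []
  | c :: rest =>
    if pvIsNum c then
      String.mk ((c :: rest).takeWhile pvIsNum) :: parseGoB (rest.dropWhile pvIsNum)
    else if pvIsOp c then
      String.mk [c] :: parseGoB rest
    else []   -- Python raises Exception here (excluded by Pre_parse)
  termination_by l => l.length
  decreasing_by
  · simpa using Nat.lt_succ_of_le (rest.length_dropWhile_le pvIsNum)
  · simp

def parse_alt (expression : String) : List String := parseGoB expression.toList

-- ===== PRECONDITION & SPEC =====
-- Pre_ excludes exactly the inputs containing a character that is neither a digit, a decimal dot,
-- an operator nor a parenthesis: Python A raises Exception("invalid syntax …") there (B too).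
def Pre_parse (expression : String) : Prop :=
  expression.toList.all (fun c => pvIsNum c || pvIsOp c) = true
instance (expression : String) : Decidable (Pre_parse expression) := by
  unfold Pre_parse; infer_instance

def pvWitness_parse : String := "1+2.5*(30-4)^2"

def Spec_parse (expression : String) (out : List String) : Prop := out = parse_alt expression
instance (expression : String) (out : List String) : Decidable (Spec_parse expression out) := by unfold Spec_parse; infer_instance

-- ===== CLAIM (what is proved, stated in full; the proofs are below) =====
def Claim_equal_parse : Prop := ∀ (expression : String), Dom_parse expression → Pre_parse expression → Spec_parse expression (parse expression)

-- ===== LEMMAS AND PROOFS =====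

-- takeWhile/dropWhile over an all-true prefix followed by a false element
theorem takeWhile_prefix_stop {p : Char → Bool} (cur : List Char) (c : Char) (t : List Char)
    (hcur : ∀ x ∈ cur, p x = true) (hc : p c = false) :
    (cur ++ c :: t).takeWhile p = cur ∧ (cur ++ c :: t).dropWhile p = c :: t := by
  induction cur with
  | nil => simp [List.takeWhile, List.dropWhile, hc]
  | cons a cs ih =>
    have ha : p a = true := hcur a (by simp)
    have := ih (fun x hx => hcur x (by simp [hx]))
    simp [List.takeWhile, List.dropWhile, ha, this.1, this.2]

-- main invariant: A's loop with flushed prefix 'res' and pending all-numeric 'cur'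
-- produces res ++ B's tokens of (cur ++ l)
theorem goA_eq_goB (l : List Char) : ∀ (res : List String) (cur : List Char),
    (∀ c ∈ l, pvIsNum c || pvIsOp c) → (∀ c ∈ cur, pvIsNum c = true) →
    parseGoA res cur l = some (res ++ parseGoB (cur ++ l)) := by
  induction l with
  | nil =>
    intro res cur _ hcur
    cases cur with
    | nil => simp [parseGoA, parseGoB]
    | cons a cs =>
      have ha : pvIsNum a := hcur a (by simp)
      have h := takeWhile_prefix_stop (p := pvIsNum) cs 'x' [] (fun x hx => hcur x (by simp [hx])) (by decide)
      have htake : (a :: cs).takeWhile pvIsNum = a :: cs := by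
        have : ∀ x ∈ a :: cs, pvIsNum x = true := hcur
        simpa using List.takeWhile_eq_self_iff.mpr this
      have hdrop : cs.dropWhile pvIsNum = [] := by
        have : ∀ x ∈ cs, pvIsNum x = true := fun x hx => hcur x (by simp [hx])
        simpa using List.dropWhile_eq_nil_iff.mpr (by intro x hx; simp [this x hx])
      simp [parseGoA, parseGoB, ha, htake, hdrop]
  | cons c t ih =>
    intro res cur hl hcur
    have hc : pvIsNum c || pvIsOp c := hl c (by simp)
    have ht : ∀ x ∈ t, pvIsNum x || pvIsOp x := fun x hx => hl x (by simp [hx])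
    by_cases hnum : pvIsNum c = true
    · have := ih res (cur ++ [c]) ht
        (by intro x hx; rcases List.mem_append.mp hx with h | h
            · exact hcur x h
            · simp at h; simpa [h] using hnum)
      rw [show cur ++ c :: t = (cur ++ [c]) ++ t by simp]
      simpa [parseGoA, hnum] using this
    · have hop : pvIsOp c = true := by
        rcases Bool.or_eq_true_iff.mp hc with h | h
        · exact absurd h hnum
        · exact h
      have hcf : pvIsNum c = false := by simpa using hnum
      cases cur with
      | nil =>
        have := ih (res ++ [String.mk [c]]) [] ht (by simp)
        simp [parseGoA, hnum, hop, parseGoB, hcf, this]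
      | cons a cs =>
        have ha : pvIsNum a := hcur a (by simp)
        have hstop := takeWhile_prefix_stop (p := pvIsNum) (a :: cs) c t hcur hcf
        have hstop' := takeWhile_prefix_stop (p := pvIsNum) cs c t
            (fun x hx => hcur x (by simp [hx])) hcf
        have := ih (res ++ [String.mk (a :: cs)] ++ [String.mk [c]]) [] ht (by simp)
        simp only [parseGoA, hnum, hcf, hop, if_true, if_false, Bool.false_eq_true,
          List.length_cons, List.cons_append]
        rw [parseGoB]
        simp only [ha, if_true]
        rw [show a :: (cs ++ c :: t) = (a :: cs) ++ c :: t from rfl] at *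
        rw [hstop.1, hstop'.2]
        rw [parseGoB]
        simp only [hcf, hop, if_false, if_true, Bool.false_eq_true]
        simpa using this

-- ===== VERDICT (by name: the statement is the Claim_ definition above) =====
theorem parse_spec : Claim_equal_parse := by
  intro e _ hpre
  unfold Spec_parse parse parse_alt
  have hl : ∀ c ∈ e.toList, pvIsNum c || pvIsOp c := by
    have := hpre
    unfold Pre_parse at this
    simpa using fun c hc => (List.all_eq_true.mp this) c hc
  rw [goA_eq_goB e.toList [] [] hl (by simp)]
  simp
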